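-- pv_equiv track=rewrite | github.com/yangwei-lim/Device_Generator | Pattern.py | simple_1d_interdigitated_pattern
-- ===== SOURCE A (Python) =====
-- def simple_1d_interdigitated_pattern(inst: list) -> list:
--     """
--     @brief: simple 1D interdigitated pattern
--     @param: inst -> instance list (e.g. [1, 2, 3]: one 0, two 1, three 2)
--     @return: pattern -> pattern list (e.g. [0, 1, 2, 1, 2, 2])
--     """
--     pattern = []
--
--     # convert the instances number to a dictionary
--     counts = dict(enumerate(inst))
--
--     # find the maximum count
--     max_count = max(inst)
--
--     # create the interdigitated pattern
--     # loop through the maximum count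
--     for _ in range(max_count):
--
--          # loop through the instance
--         for num in counts:
--
--             # check the instance count
--             if counts[num] > 0:
--                 pattern.append(num)
--                 counts[num] -= 1
--
--     return pattern
-- ===== SOURCE B (Python) =====
-- def simple_1d_interdigitated_pattern(inst: list) -> list:
--     """Round-grouped construction: consecutive rounds share the same active
--     index set, so emit each distinct positive count level as one repeated block."""
--     pattern = []
--     prev = 0
--     for t in sorted(set(c for c in inst if c > 0)):
--         active = [i for i, c in enumerate(inst) if c >= t]
--         pattern += active * (t - prev)
--         prev = t
--     return pattern
-- ===== Notes on version B (the rewrite author's own statement) =====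
-- stated objective: faster
-- what changed: instead of scanning all n indices in every one of max(inst) rounds, B emits one block per distinct positive count level (rounds between consecutive levels have the same active index set), so the per-round scan over exhausted indices disappears; B also returns [] on the empty list where A raises.
-- outside the precondition, e.g. on simple_1d_interdigitated_pattern([]): A raises ValueError, B returns []
import Mathlib
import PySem

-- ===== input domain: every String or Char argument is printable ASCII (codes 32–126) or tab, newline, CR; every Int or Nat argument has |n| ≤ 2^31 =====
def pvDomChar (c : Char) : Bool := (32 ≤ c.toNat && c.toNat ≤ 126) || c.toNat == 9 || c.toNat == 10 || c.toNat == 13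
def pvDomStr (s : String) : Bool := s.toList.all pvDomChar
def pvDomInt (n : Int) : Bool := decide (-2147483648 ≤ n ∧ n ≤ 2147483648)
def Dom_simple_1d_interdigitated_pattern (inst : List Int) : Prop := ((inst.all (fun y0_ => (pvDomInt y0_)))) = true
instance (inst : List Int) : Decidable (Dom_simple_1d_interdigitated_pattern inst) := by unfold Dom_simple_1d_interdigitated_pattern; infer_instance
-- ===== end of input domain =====

-- B replaces A's per-round scan of all indices by one emitted block per distinct positive
-- count level (objective: faster when max(inst) exceeds the number of distinct counts).

-- ===== PORT A =====
def simple_1d_interdigitated_pattern (inst : List Int) : List Int :=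
  let counts : PySem.Dict Int Int :=
    (PySem.List.enumerate inst).foldl (fun d p => d.insert p.1 p.2) PySem.Dict.empty
  match PySem.List.max? inst (fun x => x) with
  | none => []  -- Python raises ValueError here; excluded by Pre_
  | some max_count =>
    ((PySem.List.pyRange 0 max_count 1).foldl
      (fun (st : List Int × PySem.Dict Int Int) _ =>
        st.2.keys.foldl
          (fun (st' : List Int × PySem.Dict Int Int) num =>
            if 0 < st'.2.getD num 0 then
              (st'.1 ++ [num], st'.2.modify num 0 (fun v => v - 1))
            else st')
          st)
      ([], counts)).1

-- ===== PORT B =====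
def simple_1d_interdigitated_pattern_alt (inst : List Int) : List Int :=
  let thresholds :=
    PySem.List.sorted (PySem.Set.ofList (inst.filter (fun c => decide (0 < c)))) (fun x => x) false
  (thresholds.foldl
    (fun (st : List Int × Int) t =>
      let active := ((PySem.List.enumerate inst).filter (fun q => decide (t ≤ q.2))).map (fun q => q.1)
      (st.1 ++ PySem.List.pyRepeat active (t - st.2), t))
    ([], 0)).1

-- ===== PRECONDITION & SPEC =====
-- Pre_ excludes only the empty list, on which Python A raises ValueError (max() of empty sequence).
def Pre_simple_1d_interdigitated_pattern (inst : List Int) : Prop := inst ≠ []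
instance (inst : List Int) : Decidable (Pre_simple_1d_interdigitated_pattern inst) := by
  unfold Pre_simple_1d_interdigitated_pattern; infer_instance
def pvWitness_simple_1d_interdigitated_pattern : List Int := [1, 2, 3]

def Spec_simple_1d_interdigitated_pattern (inst : List Int) (out : List Int) : Prop :=
  out = simple_1d_interdigitated_pattern_alt inst
instance (inst : List Int) (out : List Int) : Decidable (Spec_simple_1d_interdigitated_pattern inst out) := by
  unfold Spec_simple_1d_interdigitated_pattern; infer_instance

-- ===== CLAIM (what is proved, stated in full; the proofs are below) =====
def Claim_equal_simple_1d_interdigitated_pattern : Prop :=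
  ∀ (inst : List Int), Dom_simple_1d_interdigitated_pattern inst →
    Pre_simple_1d_interdigitated_pattern inst →
    Spec_simple_1d_interdigitated_pattern inst (simple_1d_interdigitated_pattern inst)

-- ===== LEMMAS AND PROOFS =====

-- the indices emitted in one round r: those i with inst[i] > r, in index order
def pvRow (inst : List Int) (r : Int) : List Int :=
  ((PySem.List.enumerate inst).filter (fun q => decide (r < q.2))).map (fun q => q.1)

-- value of A's counts dict at key i after r rounds
def pvDec (inst : List Int) (r i : Int) : Int :=
  let c := PySem.List.pyGetD inst i 0
  if 0 < c then max (c - r) 0 else c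

theorem pv_contains_of_getD_pos (d : PySem.Dict Int Int) (k : Int) (h : 0 < d.getD k 0) :
    d.contains k = true := by
  by_contra hc
  rw [PySem.Dict.getD_of_not_contains d 0 (by simpa using hc)] at h
  omega

theorem pv_innerA (ks : List Int) (pat : List Int) (d : PySem.Dict Int Int) (hnd : ks.Nodup) :
    (ks.foldl
      (fun (st' : List Int × PySem.Dict Int Int) num =>
        if 0 < st'.2.getD num 0 then
          (st'.1 ++ [num], st'.2.modify num 0 (fun v => v - 1))
        else st') (pat, d)).1
      = pat ++ ks.filter (fun k => decide (0 < d.getD k 0)) ∧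
    ((ks.foldl
      (fun (st' : List Int × PySem.Dict Int Int) num =>
        if 0 < st'.2.getD num 0 then
          (st'.1 ++ [num], st'.2.modify num 0 (fun v => v - 1))
        else st') (pat, d)).2.keys = d.keys ∧
     ∀ k : Int, (ks.foldl
      (fun (st' : List Int × PySem.Dict Int Int) num =>
        if 0 < st'.2.getD num 0 then
          (st'.1 ++ [num], st'.2.modify num 0 (fun v => v - 1))
        else st') (pat, d)).2.getD k 0
        = if k ∈ ks ∧ 0 < d.getD k 0 then d.getD k 0 - 1 else d.getD k 0) := by
  induction ks generalizing pat d with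
  | nil => simp
  | cons num ks ih =>
    have hnum : num ∉ ks := (List.nodup_cons.mp hnd).1
    have hnd' : ks.Nodup := (List.nodup_cons.mp hnd).2
    simp only [List.foldl_cons, List.filter_cons]
    by_cases h : 0 < d.getD num 0
    · rw [if_pos h]
      obtain ⟨h1, h2, h3⟩ := ih (pat ++ [num]) (d.modify num 0 (fun v => v - 1)) hnd'
      have hgd : ∀ k : Int, (d.modify num 0 (fun v => v - 1)).getD k 0
          = if k = num then d.getD num 0 - 1 else d.getD k 0 := by
        intro k; rw [PySem.Dict.getD_modify]
      refine ⟨?_, ?_, ?_⟩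
      · rw [h1, List.append_assoc, List.singleton_append]
        simp only [decide_eq_true_eq]
        rw [if_pos h]
        congr 1
        congr 1
        apply List.filter_congr
        intro k hk
        have hne : k ≠ num := fun e => hnum (e ▸ hk)
        rw [hgd k, if_neg hne]
      · rw [h2]
        have hc := pv_contains_of_getD_pos d num h
        rw [PySem.Dict.keys_modify, PySem.Dict.keys_insert_of_contains d _ hc]
      · intro k
        rw [h3, hgd k]
        by_cases hk : k = num
        · subst hk; simp [hnum, h]
        · simp [hk]
    · rw [if_neg h]
      obtain ⟨h1, h2, h3⟩ := ih pat d hnd'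
      refine ⟨?_, h2, ?_⟩
      · rw [h1]
        congr 1
        simp only [decide_eq_true_eq]
        rw [if_neg h]
      · intro k
        rw [h3]
        by_cases hk : k = num
        · subst hk; simp [hnum, h]
        · simp [hk]



theorem pv_rowEq (inst : List Int) (r : Int) (hr : 0 ≤ r) :
    (PySem.List.pyRange 0 ((inst.length : Int))).filter (fun k => decide (0 < pvDec inst r k))
      = pvRow inst r := by
  unfold pvRow
  rw [PySem.List.enumerate_eq_map_pyRange inst 0]
  rw [List.filter_map]
  simp only [PySem.List.len_eq, Function.comp_def, List.map_map]
  rw [List.map_id']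
  apply List.filter_congr
  intro k _
  simp only [decide_eq_decide, pvDec]
  by_cases h : 0 < PySem.List.pyGetD inst k 0 <;> simp [h] <;> omega

theorem pv_d0_keys (inst : List Int) :
    ((PySem.List.enumerate inst).foldl (fun d p => d.insert p.1 p.2)
        (PySem.Dict.empty : PySem.Dict Int Int)).keys
      = PySem.List.pyRange 0 ((inst.length : Int)) := by
  rw [PySem.Dict.keys_foldl_insert_key (PySem.List.enumerate inst) (fun p => p.1)
        (fun _ p => p.2) PySem.Dict.empty]
  rw [PySem.Dict.keys_empty, PySem.Set.update_nil_left, PySem.List.map_fst_enumerate]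
  simp [PySem.Set.ofList_eq_self_of_nodup _ (PySem.List.nodup_pyRange_one _ _)]

theorem pv_d0_items (inst : List Int) :
    ((PySem.List.enumerate inst).foldl (fun d p => d.insert p.1 p.2)
        (PySem.Dict.empty : PySem.Dict Int Int)).items = PySem.List.enumerate inst := by
  rw [PySem.Dict.items_foldl_insert_fresh (PySem.List.enumerate inst) (fun p => p.1)
        (fun p => p.2) PySem.Dict.empty (by intro a _; simp [PySem.Dict.contains_empty])
        (by rw [PySem.List.map_fst_enumerate]; exact PySem.List.nodup_pyRange_one _ _)]
  simp [PySem.Dict.empty, PySem.Dict.items]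

theorem pv_d0_getD (inst : List Int) (k : Int)
    (hk : k ∈ PySem.List.pyRange 0 ((inst.length : Int))) :
    ((PySem.List.enumerate inst).foldl (fun d p => d.insert p.1 p.2)
        (PySem.Dict.empty : PySem.Dict Int Int)).getD k 0 = PySem.List.pyGetD inst k 0 := by
  apply PySem.Dict.getD_of_mem_items
  · rw [pv_d0_items, PySem.List.enumerate_eq_map_pyRange inst 0]
    simp only [PySem.List.len_eq]
    exact List.mem_map_of_mem hk
  · rw [pv_d0_keys]; exact PySem.List.nodup_pyRange_one _ _

theorem pv_outerA (inst : List Int) (r : Nat) :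
    ((PySem.List.pyRange 0 ((r : Int))).foldl
      (fun (st : List Int × PySem.Dict Int Int) _ =>
        st.2.keys.foldl
          (fun (st' : List Int × PySem.Dict Int Int) num =>
            if 0 < st'.2.getD num 0 then
              (st'.1 ++ [num], st'.2.modify num 0 (fun v => v - 1))
            else st')
          st)
      ([], (PySem.List.enumerate inst).foldl (fun d p => d.insert p.1 p.2)
        (PySem.Dict.empty : PySem.Dict Int Int))).1
      = (PySem.List.pyRange 0 ((r : Int))).flatMap (pvRow inst) ∧
    ((PySem.List.pyRange 0 ((r : Int))).foldl
      (fun (st : List Int × PySem.Dict Int Int) _ =>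
        st.2.keys.foldl
          (fun (st' : List Int × PySem.Dict Int Int) num =>
            if 0 < st'.2.getD num 0 then
              (st'.1 ++ [num], st'.2.modify num 0 (fun v => v - 1))
            else st')
          st)
      ([], (PySem.List.enumerate inst).foldl (fun d p => d.insert p.1 p.2)
        (PySem.Dict.empty : PySem.Dict Int Int))).2.keys
      = PySem.List.pyRange 0 ((inst.length : Int)) ∧
    ∀ k ∈ PySem.List.pyRange 0 ((inst.length : Int)),
      ((PySem.List.pyRange 0 ((r : Int))).foldl
      (fun (st : List Int × PySem.Dict Int Int) _ =>
        st.2.keys.foldl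
          (fun (st' : List Int × PySem.Dict Int Int) num =>
            if 0 < st'.2.getD num 0 then
              (st'.1 ++ [num], st'.2.modify num 0 (fun v => v - 1))
            else st')
          st)
      ([], (PySem.List.enumerate inst).foldl (fun d p => d.insert p.1 p.2)
        (PySem.Dict.empty : PySem.Dict Int Int))).2.getD k 0 = pvDec inst ((r : Int)) k := by
  induction r with
  | zero =>
    refine ⟨?_, ?_, ?_⟩ <;>
      simp only [Nat.cast_zero, PySem.List.pyRange_one_eq_nil (le_refl (0 : Int)),
        List.foldl_nil, List.flatMap_nil]
    · exact pv_d0_keys inst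
    · intro k hk
      rw [pv_d0_getD inst k hk]
      simp only [pvDec]
      generalize PySem.List.pyGetD inst k 0 = c
      simp only [max_def]
      split_ifs <;> omega
  | succ r ih =>
    obtain ⟨h1, h2, h3⟩ := ih
    rw [show (((r + 1 : Nat) : Int)) = ((r : Int)) + 1 by push_cast; ring,
      PySem.List.pyRange_one_succ_right (by positivity), List.foldl_append, List.foldl_cons,
      List.foldl_nil, List.flatMap_append]
    have hnd : ((PySem.List.pyRange 0 ((r : Int))).foldl
      (fun (st : List Int × PySem.Dict Int Int) _ =>
        st.2.keys.foldl
          (fun (st' : List Int × PySem.Dict Int Int) num =>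
            if 0 < st'.2.getD num 0 then
              (st'.1 ++ [num], st'.2.modify num 0 (fun v => v - 1))
            else st')
          st)
      ([], (PySem.List.enumerate inst).foldl (fun d p => d.insert p.1 p.2)
        (PySem.Dict.empty : PySem.Dict Int Int))).2.keys.Nodup := by
      rw [h2]; exact PySem.List.nodup_pyRange_one _ _
    obtain ⟨g1, g2, g3⟩ := pv_innerA _ _ _ hnd
    refine ⟨?_, ?_, ?_⟩
    · rw [g1, h1, h2]
      congr 1
      simp only [List.flatMap_cons, List.flatMap_nil, List.append_nil]
      rw [← pv_rowEq inst ((r : Int)) (by positivity)]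
      apply List.filter_congr
      intro k hk
      rw [h3 k hk]
    · rw [g2, h2]
    · intro k hk
      rw [g3 k, h2, h3 k hk]
      simp only [pvDec, hk, true_and]
      generalize PySem.List.pyGetD inst k 0 = c
      simp only [max_def]
      split_ifs <;> omega




-- an element of enumerate has its second component in the list
theorem pv_snd_mem_enumerate (inst : List Int) (q : Int × Int)
    (hq : q ∈ PySem.List.enumerate inst) : q.2 ∈ inst := by
  have := PySem.List.map_snd_enumerate inst 0
  exact this ▸ List.mem_map_of_mem hq

-- on a block of rounds below the next threshold, the row is the active set of that threshold
theorem pv_rowConst (inst : List Int) (r t : Int) (hrt : r < t)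
    (hcov : ∀ c ∈ inst, r < c → t ≤ c) :
    pvRow inst r
      = ((PySem.List.enumerate inst).filter (fun q => decide (t ≤ q.2))).map (fun q => q.1) := by
  unfold pvRow
  congr 1
  apply List.filter_congr
  intro q hq
  have hc := pv_snd_mem_enumerate inst q hq
  simp only [decide_eq_decide]
  constructor
  · exact fun h => hcov q.2 hc h
  · intro h; omega

theorem pv_flatMap_const (l : List Int) (a : List Int) :
    l.flatMap (fun _ => a) = (List.replicate l.length a).flatten := by
  induction l with
  | nil => rfl
  | cons x l ih => simp [List.flatMap_cons, List.replicate_succ, ih]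

-- strictly increasing list: getLastD is an upper bound
theorem pv_le_getLastD (p : Int) (ts : List Int) (h : (p :: ts).Pairwise (· < ·)) :
    ∀ x ∈ ts, x ≤ ts.getLastD p := by
  induction ts generalizing p with
  | nil => simp
  | cons t ts ih =>
    intro x hx
    have h' : (t :: ts).Pairwise (· < ·) := h.tail
    rcases List.mem_cons.mp hx with rfl | hx
    · cases ts with
      | nil => simp
      | cons u us =>
        simp only [List.getLastD_cons]
        have := ih x h' u (by simp)
        have htu : x < u := (List.pairwise_cons.mp h').1 u (by simp)
        simp only [List.getLastD_cons] at this ⊢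
        omega
    · have := ih t h' x hx
      cases ts with
      | nil => simp at hx
      | cons u us => simpa using this

theorem pv_Bloop (inst : List Int) (ts : List Int) (p : Int) (acc : List Int)
    (hp : 0 ≤ p)
    (hinc : (p :: ts).Pairwise (· < ·))
    (hcov : ∀ c ∈ inst, p < c → c ∈ ts) :
    (ts.foldl
      (fun (st : List Int × Int) t =>
        let active := ((PySem.List.enumerate inst).filter (fun q => decide (t ≤ q.2))).map (fun q => q.1)
        (st.1 ++ PySem.List.pyRepeat active (t - st.2), t))
      (acc, p)).1
      = acc ++ (PySem.List.pyRange p (ts.getLastD p)).flatMap (pvRow inst) := by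
  induction ts generalizing p acc with
  | nil =>
    simp [PySem.List.pyRange_one_eq_nil (le_refl p)]
  | cons t ts ih =>
    have hpt : p < t := (List.pairwise_cons.mp hinc).1 t (by simp)
    have hinc' : (t :: ts).Pairwise (· < ·) := hinc.tail
    have hcov' : ∀ c ∈ inst, t < c → c ∈ ts := by
      intro c hc htc
      have := hcov c hc (by omega)
      rcases List.mem_cons.mp this with heq | h
      · omega
      · exact h
    simp only [List.foldl_cons]
    rw [ih t _ (by omega) hinc' hcov']
    have hblock : PySem.List.pyRepeat
        (((PySem.List.enumerate inst).filter (fun q => decide (t ≤ q.2))).map (fun q => q.1))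
        (t - p) = (PySem.List.pyRange p t).flatMap (pvRow inst) := by
      have h1 : (PySem.List.pyRange p t).flatMap (pvRow inst)
          = (PySem.List.pyRange p t).flatMap (fun _ =>
              ((PySem.List.enumerate inst).filter (fun q => decide (t ≤ q.2))).map (fun q => q.1)) := by
        apply List.flatMap_congr
        intro r hr
        have hr' := PySem.List.mem_pyRange_one.mp hr
        apply pv_rowConst inst r t (by omega)
        intro c hc hrc
        have : c ∈ t :: ts := hcov c hc (by omega)
        rcases List.mem_cons.mp this with heq | h
        · omega
        · have hall : ∀ x ∈ ts, t < x := (List.pairwise_cons.mp hinc').1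
          have := hall c h
          omega
      rw [h1, pv_flatMap_const, PySem.List.length_pyRange_one]
      rfl
    rw [hblock]
    rw [List.append_assoc, ← List.flatMap_append, ← PySem.List.pyRange_one_append p t _ (by omega) ?hle]
    case hle =>
      cases ts with
      | nil => simp
      | cons u us =>
        have := pv_le_getLastD t (u :: us) hinc' u (by simp)
        have htu : t < u := (List.pairwise_cons.mp hinc').1 u (by simp)
        simp only [List.getLastD_cons] at this ⊢
        omega
    cases ts with
    | nil => simp
    | cons u us =>
      obtain ⟨x, hx⟩ := Option.isSome_iff_exists.mp
        (List.getLast?_isSome.mpr (by simp) : (u :: us).getLast?.isSome)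
      simp [List.getLastD, hx]


theorem pv_A_eq (inst : List Int) (m : Int)
    (hm : PySem.List.max? inst (fun x => x) = some m) :
    simple_1d_interdigitated_pattern inst
      = (PySem.List.pyRange 0 m).flatMap (pvRow inst) := by
  unfold simple_1d_interdigitated_pattern
  simp only [hm]
  by_cases hle : m ≤ 0
  · rw [PySem.List.pyRange_one_eq_nil hle]
    simp
  · have hpos : 0 < m := by omega
    have hcast : m = ((m.toNat : Nat) : Int) := by omega
    rw [hcast]
    exact (pv_outerA inst m.toNat).1

theorem pv_B_eq (inst : List Int) (m : Int) (hne : inst ≠ [])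
    (hm : PySem.List.max? inst (fun x => x) = some m) :
    simple_1d_interdigitated_pattern_alt inst
      = (PySem.List.pyRange 0 m).flatMap (pvRow inst) := by
  unfold simple_1d_interdigitated_pattern_alt
  show ((PySem.List.sorted (PySem.Set.ofList (inst.filter (fun c => decide (0 < c)))) (fun x => x) false).foldl
      (fun (st : List Int × Int) t =>
        let active := ((PySem.List.enumerate inst).filter (fun q => decide (t ≤ q.2))).map (fun q => q.1)
        (st.1 ++ PySem.List.pyRepeat active (t - st.2), t))
      ([], 0)).1 = _
  set ts := PySem.List.sorted (PySem.Set.ofList (inst.filter (fun c => decide (0 < c)))) (fun x => x) false with hts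
  have hmem : ∀ x : Int, x ∈ ts ↔ 0 < x ∧ x ∈ inst := by
    intro x
    rw [hts, PySem.List.mem_sorted, PySem.Set.mem_ofList, List.mem_filter]
    simp [and_comm]
  have hpair : ts.Pairwise (· < ·) := PySem.List.sorted_ofList_pairwise_lt _
  have hinc : ((0 : Int) :: ts).Pairwise (· < ·) :=
    List.pairwise_cons.mpr ⟨fun x hx => ((hmem x).mp hx).1, hpair⟩
  have hcov : ∀ c ∈ inst, (0 : Int) < c → c ∈ ts := fun c hc h0 => (hmem c).mpr ⟨h0, hc⟩
  rw [pv_Bloop inst ts 0 [] (le_refl 0) hinc hcov, List.nil_append]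
  by_cases hle : m ≤ 0
  · have htsnil : ts = [] := by
      cases h : ts with
      | nil => rfl
      | cons a l =>
        exfalso
        have ha := (hmem a).mp (by rw [h]; simp)
        have := PySem.List.max?_isMax hm a ha.2
        simp only at this
        omega
    rw [htsnil]
    rw [PySem.List.pyRange_one_eq_nil hle]
    simp
  · have hpos : 0 < m := by omega
    have hmts : m ∈ ts := (hmem m).mpr ⟨hpos, PySem.List.max?_mem hm⟩
    have h1 : m ≤ ts.getLastD 0 := pv_le_getLastD 0 ts hinc m hmts
    have h2 : ts.getLastD 0 ≤ m := by
      cases h : ts with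
      | nil => rw [h] at hmts; simp at hmts
      | cons a l =>
        have hlast : (a :: l).getLastD 0 ∈ a :: l := List.mem_of_getLast? rfl
        have := (hmem ((a :: l).getLastD 0)).mp (by rw [h]; exact hlast)
        have := PySem.List.max?_isMax hm _ this.2
        simpa using this
    rw [le_antisymm h2 h1]

-- ===== VERDICT (by name: the statement is the Claim_ definition above) =====
theorem simple_1d_interdigitated_pattern_spec : Claim_equal_simple_1d_interdigitated_pattern := by
  intro inst _ hpre
  unfold Spec_simple_1d_interdigitated_pattern
  obtain ⟨m, hm⟩ : ∃ m, PySem.List.max? inst (fun x => x) = some m := by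
    cases h : PySem.List.max? inst (fun x => x) with
    | none => exact absurd ((PySem.List.max?_eq_none_iff inst (fun x => x)).mp h) hpre
    | some m => exact ⟨m, rfl⟩
  rw [pv_A_eq inst m hm, pv_B_eq inst m hpre hm]
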